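-- pv_equiv track=rewrite | github.com/sitingGZ/bert-sner-cardio | app/modules/train_semantic_span.py | retrieve_level_sent_ids
-- ===== SOURCE A (Python) =====
-- def retrieve_level_sent_ids(dataset):
--     # All levels [2, 3, 4, 5, 6, 7, 8], the lower level are parent terms
--     level_sent_ids = {i: [] for i in range(2,9)}
--     # Each sample in dataset
--     for i, input_word_tags in enumerate(dataset):
--         max_level = 1
--         # Each token in current sample
--         for w,d in input_word_tags.items():
--             # Find out the deepest level
--             max_level = max(max_level, max(d['tui'].keys()))
--
--         for k, l in level_sent_ids.items():
--             # Add the current sample to the lower levels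
--             if k<=max_level:
--                 l.append(i)
--     return level_sent_ids
-- ===== SOURCE B (Python) =====
-- def _merge(xs, ys):
--     # merge two ascending lists of distinct indices into one ascending list
--     out = []
--     i = j = 0
--     while i < len(xs) and j < len(ys):
--         if xs[i] <= ys[j]:
--             out.append(xs[i]); i += 1
--         else:
--             out.append(ys[j]); j += 1
--     out.extend(xs[i:])
--     out.extend(ys[j:])
--     return out
--
--
-- def retrieve_level_sent_ids(dataset):
--     # Bucket each sample index under its clamped deepest level min(max_level, 8),
--     # then build the per-level lists by merging buckets from the deepest level down:
--     # level k = sorted union of buckets k..8, accumulated as acc = merge(acc, bucket[k]).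
--     buckets = {k: [] for k in range(2, 9)}
--     for i, input_word_tags in enumerate(dataset):
--         max_level = 1
--         for d in input_word_tags.values():
--             max_level = max(max_level, max(d['tui'].keys()))
--         b = min(max_level, 8)
--         if b >= 2:
--             buckets[b].append(i)
--     acc = []
--     result = {}
--     for k in range(8, 1, -1):
--         acc = _merge(acc, buckets[k])
--         result[k] = acc
--     return {k: result[k] for k in range(2, 9)}
-- ===== Notes on version B (the rewrite author's own statement) =====
-- stated objective: alternative
-- what changed: A walks the samples appending each index to every qualifying level's list (membership test per level per sample); B instead partitions the indices into per-level buckets keyed by the clamped deepest level min(max_level,8) and then reconstructs each level's list by a descending two-pointer merge accumulation (level k = merge of the level-(k+1) list with bucket k), exploiting the nesting level 8 ⊆ … ⊆ level 2.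
import Mathlib
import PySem

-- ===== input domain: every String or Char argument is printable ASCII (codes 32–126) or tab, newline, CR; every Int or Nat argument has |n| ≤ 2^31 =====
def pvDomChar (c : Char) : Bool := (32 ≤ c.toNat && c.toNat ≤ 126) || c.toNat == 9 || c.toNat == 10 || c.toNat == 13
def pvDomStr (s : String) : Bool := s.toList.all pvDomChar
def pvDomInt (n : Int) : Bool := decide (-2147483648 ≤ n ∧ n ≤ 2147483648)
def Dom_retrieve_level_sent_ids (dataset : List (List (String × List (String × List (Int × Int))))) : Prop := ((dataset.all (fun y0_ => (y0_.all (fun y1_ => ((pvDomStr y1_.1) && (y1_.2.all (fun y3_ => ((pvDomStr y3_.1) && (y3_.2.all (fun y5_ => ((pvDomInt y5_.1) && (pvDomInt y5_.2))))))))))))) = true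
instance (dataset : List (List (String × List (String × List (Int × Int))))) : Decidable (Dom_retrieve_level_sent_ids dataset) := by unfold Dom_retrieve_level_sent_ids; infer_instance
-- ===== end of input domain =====

-- B buckets each sample index under its clamped deepest level and builds the per-level lists by a
-- descending merge of buckets, instead of A's per-level membership appends; proved equal on inputs
-- where every token has a nonempty 'tui' dict (elsewhere Python A — and B — raises).

-- ===== PORT A =====
-- max_level = max(max_level, max(d['tui'].keys())); the .getD fallbacks are reached only outside Pre_ (Python raises there)
def pvMaxLevelStep (acc : Int) (wd : String × List (String × List (Int × Int))) : Int :=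
  max acc (((PySem.List.max? (PySem.Dict.keys ⟨(PySem.Dict.get? ⟨wd.2⟩ "tui").getD []⟩) id).getD 0))

def retrieve_level_sent_ids (dataset : List (List (String × List (String × List (Int × Int))))) : List (Int × List Int) :=
  -- level_sent_ids = {i: [] for i in range(2,9)}
  let init : List (Int × List Int) := (PySem.List.pyRange 2 9 1).map (fun i => (i, []))
  -- for i, input_word_tags in enumerate(dataset): … for k, l in level_sent_ids.items(): if k<=max_level: l.append(i)
  (PySem.List.enumerate dataset).foldl
    (fun table p =>
      let max_level := p.2.foldl pvMaxLevelStep 1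
      table.map (fun kl => if kl.1 ≤ max_level then (kl.1, kl.2 ++ [p.1]) else kl))
    init

-- ===== PORT B =====
-- _merge(xs, ys): two-pointer merge of two ascending lists
def pvMerge : List Int → List Int → List Int
  | [], ys => ys
  | x :: xs, [] => x :: xs
  | x :: xs, y :: ys => if x ≤ y then x :: pvMerge xs (y :: ys) else y :: pvMerge (x :: xs) ys

def retrieve_level_sent_ids_alt (dataset : List (List (String × List (String × List (Int × Int))))) : List (Int × List Int) :=
  -- buckets = {k: [] for k in range(2,9)}; buckets[min(max_level,8)].append(i) when ≥ 2
  let buckets : List (Int × List Int) :=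
    (PySem.List.enumerate dataset).foldl
      (fun bs p =>
        let max_level := p.2.foldl pvMaxLevelStep 1
        let b := min max_level 8
        if 2 ≤ b then bs.map (fun kl => if kl.1 == b then (kl.1, kl.2 ++ [p.1]) else kl) else bs)
      ((PySem.List.pyRange 2 9 1).map (fun k => (k, [])))
  -- acc = []; for k in range(8,1,-1): acc = merge(acc, buckets[k]); result[k] = acc
  let st := (PySem.List.pyRange 8 1 (-1)).foldl
      (fun st k =>
        let acc := pvMerge st.1 ((PySem.Dict.get? ⟨buckets⟩ k).getD [])
        (acc, st.2 ++ [(k, acc)]))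
      (([] : List Int), ([] : List (Int × List Int)))
  -- return {k: result[k] for k in range(2,9)}
  (PySem.List.pyRange 2 9 1).map (fun k => (k, (PySem.Dict.get? ⟨st.2⟩ k).getD []))

-- ===== PRECONDITION & SPEC =====
-- Pre_ excludes exactly the inputs where Python A raises: a token dict without a "tui" key (KeyError) or with an empty 'tui' dict (max() ValueError); B raises there too.
def Pre_retrieve_level_sent_ids (dataset : List (List (String × List (String × List (Int × Int))))) : Prop :=
  (dataset.all (fun sample => sample.all (fun wd =>
    match PySem.Dict.get? ⟨wd.2⟩ "tui" with
    | some ts => !(PySem.Dict.keys ⟨ts⟩).isEmpty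
    | none => false))) = true
instance (dataset : List (List (String × List (String × List (Int × Int))))) : Decidable (Pre_retrieve_level_sent_ids dataset) := by unfold Pre_retrieve_level_sent_ids; infer_instance

def pvWitness_retrieve_level_sent_ids : (List (List (String × List (String × List (Int × Int))))) :=
  [[("w1", [("tui", [(3, 0), (5, 1)])]), ("w2", [("tui", [(2, 0)])])], []]

def Spec_retrieve_level_sent_ids (dataset : List (List (String × List (String × List (Int × Int))))) (out : List (Int × List Int)) : Prop := out = retrieve_level_sent_ids_alt dataset
instance (dataset : List (List (String × List (String × List (Int × Int))))) (out : List (Int × List Int)) : Decidable (Spec_retrieve_level_sent_ids dataset out) := by unfold Spec_retrieve_level_sent_ids; infer_instance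

-- ===== CLAIM (what is proved, stated in full; the proofs are below) =====
def Claim_equal_retrieve_level_sent_ids : Prop := ∀ (dataset : List (List (String × List (String × List (Int × Int))))), Dom_retrieve_level_sent_ids dataset → Pre_retrieve_level_sent_ids dataset → Spec_retrieve_level_sent_ids dataset (retrieve_level_sent_ids dataset)

-- ===== LEMMAS AND PROOFS =====

-- the per-sample max level both programs compute
def pvML (sample : List (String × List (String × List (Int × Int)))) : Int :=
  sample.foldl pvMaxLevelStep 1

-- indices i (enumerating from s) whose max level satisfies p
def pvIdsP (p : Int → Bool) (ms : List Int) (s : Int) : List Int :=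
  ((PySem.List.enumerate ms s).filter (fun im => p im.2)).map (·.1)

theorem pvIdsP_nil (p : Int → Bool) (s : Int) : pvIdsP p [] s = [] := rfl

theorem pvIdsP_cons (p : Int → Bool) (m : Int) (ms : List Int) (s : Int) :
    pvIdsP p (m :: ms) s = (if p m then [s] else []) ++ pvIdsP p ms (s + 1) := by
  simp only [pvIdsP, PySem.List.enumerate_cons, List.filter_cons]
  by_cases h : p m <;> simp [h]

theorem pvIdsP_lt (p : Int → Bool) (ms : List Int) (s : Int) :
    ∀ x ∈ pvIdsP p ms s, s ≤ x := by
  induction ms generalizing s with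
  | nil => simp [pvIdsP_nil]
  | cons m ms ih =>
    intro x hx
    rw [pvIdsP_cons] at hx
    rcases List.mem_append.1 hx with h | h
    · split_ifs at h <;> simp_all
    · have := ih (s + 1) x h; omega

theorem pvMerge_nil_left (ys : List Int) : pvMerge [] ys = ys := by
  cases ys <;> simp [pvMerge]

theorem pvMerge_nil_right (xs : List Int) : pvMerge xs [] = xs := by
  cases xs <;> simp [pvMerge]

theorem pvMerge_cons_left (x : Int) (xs ys : List Int) (h : ∀ y ∈ ys, x < y) :
    pvMerge (x :: xs) ys = x :: pvMerge xs ys := by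
  cases ys with
  | nil => simp [pvMerge_nil_right]
  | cons y ys =>
    have : x ≤ y := le_of_lt (h y (by simp))
    simp [pvMerge, this]

theorem pvMerge_cons_right (y : Int) (xs ys : List Int) (h : ∀ x ∈ xs, y < x) :
    pvMerge xs (y :: ys) = y :: pvMerge xs ys := by
  cases xs with
  | nil => simp [pvMerge_nil_left]
  | cons x xs =>
    have : ¬ x ≤ y := by have := h x (by simp); omega
    simp [pvMerge, this]

-- merge of two disjoint filters over the enumeration is the filter of the disjunction
theorem pvMerge_filter (p q : Int → Bool) (hdisj : ∀ m, ¬(p m = true ∧ q m = true))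
    (ms : List Int) (s : Int) :
    pvMerge (pvIdsP p ms s) (pvIdsP q ms s) = pvIdsP (fun m => p m || q m) ms s := by
  induction ms generalizing s with
  | nil => simp [pvIdsP_nil, pvMerge_nil_left]
  | cons m ms ih =>
    rw [pvIdsP_cons, pvIdsP_cons, pvIdsP_cons]
    by_cases hp : p m
    · have hq : q m = false := by
        cases hqq : q m
        · rfl
        · exact absurd ⟨hp, hqq⟩ (hdisj m)
      rw [if_pos hp, if_neg (by simp [hq]), if_pos (by simp [hp]),
        List.nil_append, List.singleton_append, List.singleton_append,
        pvMerge_cons_left _ _ _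
          (fun y hy => by have := pvIdsP_lt q ms (s + 1) y hy; omega),
        ih]
    · have hp' : p m = false := by cases hpp : p m; rfl; exact absurd hpp hp
      by_cases hq : q m
      · rw [if_neg (by simp [hp']), if_pos hq, if_pos (by simp [hq]),
          List.nil_append, List.singleton_append, List.singleton_append,
          pvMerge_cons_right _ _ _
            (fun x hx => by have := pvIdsP_lt p ms (s + 1) x hx; omega),
          ih]
      · have hq' : q m = false := by cases hqq : q m; rfl; exact absurd hqq hq
        rw [if_neg (by simp [hp']), if_neg (by simp [hq']), if_neg (by simp [hp', hq']),
          List.nil_append, List.nil_append, List.nil_append]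
        exact ih (s + 1)

theorem pvIdsP_congr (p q : Int → Bool) (h : ∀ m, p m = q m) (ms : List Int) (s : Int) :
    pvIdsP p ms s = pvIdsP q ms s := by
  simp only [pvIdsP]
  congr 1
  exact List.filter_congr (fun x _ => h x.2)

theorem pvMap_append_nil (table : List (Int × List Int)) :
    table.map (fun kl : Int × List Int => (kl.1, kl.2 ++ ([] : List Int))) = table := by
  induction table with
  | nil => rfl
  | cons kl t ih => rw [List.map_cons, List.append_nil, ih]

-- A's fold equals the table of per-level filters (m ≥ k)
theorem pvFoldA_eq (samples : List (List (String × List (String × List (Int × Int)))))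
    (s : Int) (table : List (Int × List Int)) :
    (PySem.List.enumerate samples s).foldl
      (fun table p =>
        let max_level := p.2.foldl pvMaxLevelStep 1
        table.map (fun kl => if kl.1 ≤ max_level then (kl.1, kl.2 ++ [p.1]) else kl))
      table
    = table.map (fun kl => (kl.1, kl.2 ++ pvIdsP (fun m => kl.1 ≤ m) (samples.map pvML) s)) := by
  induction samples generalizing s table with
  | nil =>
    simp only [PySem.List.enumerate_nil, List.foldl_nil, List.map_nil, pvIdsP_nil]
    exact (pvMap_append_nil table).symm
  | cons sm ss ih =>
    rw [PySem.List.enumerate_cons, List.foldl_cons, ih]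
    simp only [List.map_map, List.map_cons]
    apply List.map_congr_left
    intro kl _
    simp only [Function.comp_apply, pvIdsP_cons, pvML]
    by_cases h : kl.1 ≤ sm.foldl pvMaxLevelStep 1 <;> simp [h]

-- B's bucket fold equals the table of bucket filters (min m 8 == k), given table keys ≥ 2
theorem pvFoldB_eq (samples : List (List (String × List (String × List (Int × Int)))))
    (s : Int) (table : List (Int × List Int)) (htab : ∀ kl ∈ table, 2 ≤ kl.1) :
    (PySem.List.enumerate samples s).foldl
      (fun bs p =>
        let max_level := p.2.foldl pvMaxLevelStep 1
        let b := min max_level 8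
        if 2 ≤ b then bs.map (fun kl => if kl.1 == b then (kl.1, kl.2 ++ [p.1]) else kl) else bs)
      table
    = table.map (fun kl => (kl.1, kl.2 ++ pvIdsP (fun m => kl.1 == min m 8) (samples.map pvML) s)) := by
  induction samples generalizing s table with
  | nil =>
    simp only [PySem.List.enumerate_nil, List.foldl_nil, List.map_nil, pvIdsP_nil]
    exact (pvMap_append_nil table).symm
  | cons sm ss ih =>
    rw [PySem.List.enumerate_cons, List.foldl_cons]
    by_cases hb : 2 ≤ min (sm.foldl pvMaxLevelStep 1) 8
    · rw [if_pos hb, ih _ _ (by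
        intro kl hkl
        rcases List.mem_map.1 hkl with ⟨kl2, h1, h2⟩
        by_cases hc : (kl2.1 == min (sm.foldl pvMaxLevelStep 1) 8) = true <;>
          simp [hc] at h2 <;> rw [← h2] <;> simpa using htab kl2 h1)]
      simp only [List.map_map, List.map_cons]
      apply List.map_congr_left
      intro kl _
      simp only [Function.comp_apply, pvIdsP_cons, pvML]
      by_cases h : (kl.1 == min (sm.foldl pvMaxLevelStep 1) 8) = true <;> simp [h]
    · rw [if_neg hb, ih _ _ htab]
      apply List.map_congr_left
      intro kl hkl
      simp only [List.map_cons, pvIdsP_cons, pvML]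
      have h2 := htab kl hkl
      have hcond : (kl.1 == min (sm.foldl pvMaxLevelStep 1) 8) = false := by
        simp only [beq_eq_false_iff_ne, ne_eq]
        omega
      simp [hcond]

theorem pvRange29 : PySem.List.pyRange 2 9 1 = [2, 3, 4, 5, 6, 7, 8] := by decide
theorem pvRange81 : PySem.List.pyRange 8 1 (-1) = [8, 7, 6, 5, 4, 3, 2] := by decide

-- the level-k list both sides produce
def pvLvl (k : Int) (ms : List Int) : List Int := pvIdsP (fun m => k ≤ m) ms 0

theorem pvBase (ms : List Int) :
    pvMerge [] (pvIdsP (fun m => (8 : Int) == min m 8) ms 0) = pvLvl 8 ms := by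
  rw [pvMerge_nil_left]
  apply pvIdsP_congr
  intro m
  rw [Bool.eq_iff_iff]
  simp only [beq_iff_eq, decide_eq_true_eq]
  omega

-- merging the accumulated ≥(k+1) list with bucket k (2 ≤ k < 8) gives the ≥k list
theorem pvStepLit (k k1 : Int) (hk : 2 ≤ k) (h1 : k1 = k + 1) (hk8 : k < 8) (ms : List Int) :
    pvMerge (pvLvl k1 ms) (pvIdsP (fun m => k == min m 8) ms 0) = pvLvl k ms := by
  subst h1
  unfold pvLvl
  rw [pvMerge_filter (fun m => decide (k + 1 ≤ m)) (fun m => k == min m 8)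
    (by intro m hm; simp only [decide_eq_true_eq, beq_iff_eq] at hm; omega)]
  apply pvIdsP_congr
  intro m
  rw [Bool.eq_iff_iff]
  simp only [Bool.or_eq_true, decide_eq_true_eq, beq_iff_eq]
  omega

-- ===== VERDICT (by name: the statement is the Claim_ definition above) =====
theorem retrieve_level_sent_ids_spec : Claim_equal_retrieve_level_sent_ids := by
  intro dataset _ _
  show retrieve_level_sent_ids dataset = retrieve_level_sent_ids_alt dataset
  rw [retrieve_level_sent_ids, retrieve_level_sent_ids_alt,
    pvFoldA_eq, pvFoldB_eq _ _ _ (by rw [pvRange29]; decide), pvRange29, pvRange81]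
  simp only [List.map_cons, List.map_nil, List.foldl_cons, List.foldl_nil, List.nil_append,
    List.cons_append, PySem.Dict.get?_mk_cons]
  norm_num
  rw [pvBase, pvStepLit 7 8 (by omega) (by omega) (by omega),
    pvStepLit 6 7 (by omega) (by omega) (by omega),
    pvStepLit 5 6 (by omega) (by omega) (by omega),
    pvStepLit 4 5 (by omega) (by omega) (by omega),
    pvStepLit 3 4 (by omega) (by omega) (by omega),
    pvStepLit 2 3 (by omega) (by omega) (by omega)]
  simp [pvLvl]
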